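-- pv_equiv track=rewrite | github.com/GISMO-1/strausforge | src/strausforge/mine.py | _fit_bilinear
-- ===== SOURCE A (Python) =====
-- def _fit_bilinear(samples: list[tuple[int, int]]) -> str | None:
--     for c in range(1, 25):
--         maybe_a: int | None = None
--         ok = True
--         for n, value in samples:
--             num = value * c - n * n
--             if n == 0 or num % n != 0:
--                 ok = False
--                 break
--             a = num // n
--             maybe_a = a if maybe_a is None else maybe_a
--             if maybe_a != a:
--                 ok = False
--                 break
--         if ok and maybe_a is not None:
--             if all(
--                 (n * (n + maybe_a)) % c == 0 and (n * (n + maybe_a)) // c == value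
--                 for n, value in samples
--             ):
--                 return f"(n*(n{maybe_a:+d}))/{c}"
--     return None
-- ===== SOURCE B (Python) =====
-- def _fit_bilinear(samples: list[tuple[int, int]]) -> str | None:
--     if not samples:
--         return None
--     n0, v0 = samples[0]
--     if n0 == 0:
--         return None
--     for c in range(1, 25):
--         num = v0 * c - n0 * n0
--         if num % n0 != 0:
--             continue
--         a = num // n0
--         if all(n != 0 and n * (n + a) == v * c for n, v in samples):
--             return f"(n*(n{a:+d}))/{c}"
--     return None
-- ===== Notes on version B (the rewrite author's own statement) =====
-- stated objective: simpler
-- what changed: B derives the parameter a once from the first sample and does a single direct verification pass n*(n+a)==value*c, instead of A's per-sample re-derivation with a maybe_a consistency accumulator plus a second redundant divisibility/quotient verification pass.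
import Mathlib
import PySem

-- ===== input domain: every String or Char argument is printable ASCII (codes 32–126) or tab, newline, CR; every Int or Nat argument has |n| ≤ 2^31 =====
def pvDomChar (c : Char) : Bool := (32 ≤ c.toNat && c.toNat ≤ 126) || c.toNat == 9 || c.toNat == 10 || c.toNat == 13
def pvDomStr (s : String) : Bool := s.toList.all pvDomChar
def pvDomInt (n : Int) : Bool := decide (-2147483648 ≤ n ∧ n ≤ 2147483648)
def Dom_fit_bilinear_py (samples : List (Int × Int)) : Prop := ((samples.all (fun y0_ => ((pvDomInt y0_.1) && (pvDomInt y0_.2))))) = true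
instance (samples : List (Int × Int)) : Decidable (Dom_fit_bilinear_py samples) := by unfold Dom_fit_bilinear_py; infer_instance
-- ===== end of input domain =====

-- B derives the fitting parameter once from the first sample and verifies all samples in one
-- direct pass, instead of A's per-sample re-derivation with a maybe_a accumulator plus a second
-- verification pass (objective: simpler; same return value everywhere).

-- the f-string  f"(n*(n{a:+d}))/{c}"  (shared by both Pythons verbatim)
def pvFmt (a c : Int) : String :=
  "(n*(n" ++ (if 0 ≤ a then "+" ++ PySem.Int.toStr a else PySem.Int.toStr a) ++ "))/" ++ PySem.Int.toStr c

-- ===== PORT A =====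
-- inner loop of A over the samples, carrying (maybe_a, ok); break = returning ok = false
def pvInnerA (c : Int) : List (Int × Int) → Option Int → Option Int × Bool
  | [], ma => (ma, true)
  | (n, v) :: rest, ma =>
      let num := v * c - n * n
      if n == 0 || PySem.Int.mod num n != 0 then (ma, false)
      else
        let a := PySem.Int.floordiv num n
        let ma' := match ma with | none => some a | some m => some m
        if ma' != some a then (ma', false)
        else pvInnerA c rest ma'

-- outer loop of A over the candidates c
def pvLoopA (samples : List (Int × Int)) : List Int → Option String
  | [] => none
  | c :: cs =>
      match pvInnerA c samples none with
      | (some a, true) =>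
          if samples.all (fun p =>
              PySem.Int.mod (p.1 * (p.1 + a)) c == 0 && PySem.Int.floordiv (p.1 * (p.1 + a)) c == p.2)
          then some (pvFmt a c)
          else pvLoopA samples cs
      | _ => pvLoopA samples cs

def fit_bilinear_py (samples : List (Int × Int)) : Option String :=
  pvLoopA samples (PySem.List.pyRange 1 25 1)

-- ===== PORT B =====
-- B's loop over c: derive a from the first sample, one verification pass over all samples
def pvLoopB (samples : List (Int × Int)) (n0 v0 : Int) : List Int → Option String
  | [] => none
  | c :: cs =>
      let num := v0 * c - n0 * n0
      if PySem.Int.mod num n0 != 0 then pvLoopB samples n0 v0 cs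
      else
        let a := PySem.Int.floordiv num n0
        if samples.all (fun p => p.1 != 0 && p.1 * (p.1 + a) == p.2 * c)
        then some (pvFmt a c)
        else pvLoopB samples n0 v0 cs

def fit_bilinear_py_alt (samples : List (Int × Int)) : Option String :=
  match samples with
  | [] => none
  | (n0, v0) :: _ =>
      if n0 == 0 then none
      else pvLoopB samples n0 v0 (PySem.List.pyRange 1 25 1)

-- ===== PRECONDITION & SPEC =====
def Spec_fit_bilinear_py (samples : List (Int × Int)) (out : Option String) : Prop := out = fit_bilinear_py_alt samples
instance (samples : List (Int × Int)) (out : Option String) : Decidable (Spec_fit_bilinear_py samples out) := by unfold Spec_fit_bilinear_py; infer_instance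

-- ===== CLAIM (what is proved, stated in full; the proofs are below) =====
def Claim_equal_fit_bilinear_py : Prop := ∀ (samples : List (Int × Int)), Dom_fit_bilinear_py samples → Spec_fit_bilinear_py samples (fit_bilinear_py samples)

-- ===== LEMMAS AND PROOFS =====

-- per-sample: A's derive-and-compare condition is B's direct bilinear check (n ≠ 0 fixed)
theorem pv_sample_iff (n v c a : Int) (hn : n ≠ 0) :
    (PySem.Int.mod (v * c - n * n) n = 0 ∧ PySem.Int.floordiv (v * c - n * n) n = a) ↔
      n * (n + a) = v * c := by
  constructor
  · rintro ⟨hm, hd⟩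
    have h := PySem.Int.floordiv_mul_add_mod (v * c - n * n) n
    rw [hd, hm] at h
    nlinarith [h]
  · intro h
    have hnum : v * c - n * n = a * n := by nlinarith
    have hm : PySem.Int.mod (v * c - n * n) n = 0 := by
      rw [PySem.Int.mod_eq_zero_iff_dvd, hnum]; exact dvd_mul_left n a
    refine ⟨hm, ?_⟩
    have h2 := PySem.Int.floordiv_mul_add_mod (v * c - n * n) n
    rw [hm, add_zero] at h2
    have h3 : PySem.Int.floordiv (v * c - n * n) n * n = a * n := by rw [h2, hnum]
    exact mul_right_cancel₀ hn h3

-- A's inner loop with maybe_a already set: the state never changes and success is a per-sample all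
theorem pvInnerA_some (c a : Int) (l : List (Int × Int)) :
    pvInnerA c l (some a) =
      (some a, l.all (fun p => (p.1 != 0) && (PySem.Int.mod (p.2 * c - p.1 * p.1) p.1 == 0)
          && (PySem.Int.floordiv (p.2 * c - p.1 * p.1) p.1 == a))) := by
  induction l with
  | nil => simp [pvInnerA]
  | cons hd tl ih =>
      obtain ⟨n, v⟩ := hd
      by_cases h0 : n = 0
      · subst h0; simp [pvInnerA]
      · by_cases hm : PySem.Int.mod (v * c - n * n) n = 0
        · by_cases ha : PySem.Int.floordiv (v * c - n * n) n = a
          · simp [pvInnerA, h0, hm, ha, ih]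
          · simp [pvInnerA, h0, hm, ha, Ne.symm ha]
        · simp [pvInnerA, h0, hm]

-- A's per-sample Bool condition equals B's
theorem pv_sample_bool (c a : Int) (p : Int × Int) :
    ((p.1 != 0) && (PySem.Int.mod (p.2 * c - p.1 * p.1) p.1 == 0)
        && (PySem.Int.floordiv (p.2 * c - p.1 * p.1) p.1 == a))
      = ((p.1 != 0) && (p.1 * (p.1 + a) == p.2 * c)) := by
  obtain ⟨n, v⟩ := p
  by_cases h0 : n = 0
  · simp [h0]
  · by_cases hb : n * (n + a) = v * c
    · obtain ⟨hm, hd⟩ := (pv_sample_iff n v c a h0).mpr hb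
      simp [hm, hd, hb]
    · by_cases hm : PySem.Int.mod (v * c - n * n) n = 0
      · have hd : PySem.Int.floordiv (v * c - n * n) n ≠ a :=
          fun hd => hb ((pv_sample_iff n v c a h0).mp ⟨hm, hd⟩)
        rw [beq_eq_false_iff_ne.mpr hd, beq_eq_false_iff_ne.mpr hb]
        simp [hm]
      · rw [beq_eq_false_iff_ne.mpr hm, beq_eq_false_iff_ne.mpr hb]
        simp

-- A's redundant verification pass always holds when B's check holds (c > 0)
theorem pv_verify (c a : Int) (hc : 0 < c) (p : Int × Int)
    (h : ((p.1 != 0) && (p.1 * (p.1 + a) == p.2 * c)) = true) :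
    (PySem.Int.mod (p.1 * (p.1 + a)) c == 0 && PySem.Int.floordiv (p.1 * (p.1 + a)) c == p.2) = true := by
  obtain ⟨n, v⟩ := p
  simp only [Bool.and_eq_true, bne_iff_ne, beq_iff_eq] at h ⊢
  obtain ⟨-, hb⟩ := h
  have hm : PySem.Int.mod (n * (n + a)) c = 0 := by
    rw [PySem.Int.mod_eq_zero_iff_dvd, hb]; exact Dvd.intro_left v rfl
  refine ⟨hm, ?_⟩
  rw [PySem.Int.floordiv_eq_iff_of_pos hc]
  constructor <;> nlinarith
  -- done

-- the two loops agree on any candidate list of positive c's, for a nonempty sample list with n0 ≠ 0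
theorem pv_loops_eq (n0 v0 : Int) (rest : List (Int × Int)) (h0 : n0 ≠ 0)
    (cs : List Int) (hcs : ∀ c ∈ cs, 0 < c) :
    pvLoopA ((n0, v0) :: rest) cs = pvLoopB ((n0, v0) :: rest) n0 v0 cs := by
  induction cs with
  | nil => rfl
  | cons c cs ih =>
      have hc : 0 < c := hcs c (List.mem_cons_self ..)
      have ih' := ih (fun x hx => hcs x (List.mem_cons_of_mem _ hx))
      by_cases hm : PySem.Int.mod (v0 * c - n0 * n0) n0 = 0
      · set a := PySem.Int.floordiv (v0 * c - n0 * n0) n0 with ha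
        have h1 : pvInnerA c ((n0, v0) :: rest) none =
            (some a, rest.all (fun p => (p.1 != 0) && (PySem.Int.mod (p.2 * c - p.1 * p.1) p.1 == 0)
              && (PySem.Int.floordiv (p.2 * c - p.1 * p.1) p.1 == a))) := by
          simp [pvInnerA, h0, hm, ← ha, pvInnerA_some]
        have hhead : ((n0 != 0) && (n0 * (n0 + a) == v0 * c)) = true := by
          have := (pv_sample_iff n0 v0 c a h0).mp ⟨hm, rfl⟩
          simp [h0, this]
        have hallAB : (rest.all (fun p => (p.1 != 0) && (PySem.Int.mod (p.2 * c - p.1 * p.1) p.1 == 0)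
              && (PySem.Int.floordiv (p.2 * c - p.1 * p.1) p.1 == a)))
            = (rest.all (fun p => (p.1 != 0) && (p.1 * (p.1 + a) == p.2 * c))) := by
          exact congrArg rest.all (funext fun p => pv_sample_bool c a p)
        by_cases hall : rest.all (fun p => (p.1 != 0) && (p.1 * (p.1 + a) == p.2 * c)) = true
        · have hver : (((n0, v0) :: rest).all (fun p =>
              PySem.Int.mod (p.1 * (p.1 + a)) c == 0 && PySem.Int.floordiv (p.1 * (p.1 + a)) c == p.2)) = true := by
            rw [List.all_eq_true]
            intro p hp
            apply pv_verify c a hc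
            rcases List.mem_cons.mp hp with h | h
            · subst h; exact hhead
            · exact (List.all_eq_true.mp hall) p h
          simp only [pvLoopA, pvLoopB, h1, hallAB, hall, hver]
          simp [hm, ← ha, hhead, hall]
        · simp only [pvLoopA, pvLoopB, h1, hallAB]
          simp [hm, ← ha, hhead, hall, ih']
      · have h1 : pvInnerA c ((n0, v0) :: rest) none = (none, false) := by
          simp [pvInnerA, h0, hm]
        simp only [pvLoopA, pvLoopB, h1]
        simp [hm, ih']

-- with n0 = 0 A fails every candidate
theorem pv_loopA_zero (v0 : Int) (rest : List (Int × Int)) (cs : List Int) :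
    pvLoopA ((0, v0) :: rest) cs = none := by
  induction cs with
  | nil => rfl
  | cons c cs ih => simp [pvLoopA, pvInnerA, ih]

-- on the empty sample list A skips every candidate (maybe_a stays none)
theorem pv_loopA_nil (cs : List Int) : pvLoopA [] cs = none := by
  induction cs with
  | nil => rfl
  | cons c cs ih => simp [pvLoopA, pvInnerA, ih]

-- ===== VERDICT (by name: the statement is the Claim_ definition above) =====
theorem fit_bilinear_py_spec : Claim_equal_fit_bilinear_py := by
  intro samples _
  unfold Spec_fit_bilinear_py fit_bilinear_py fit_bilinear_py_alt
  match samples with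
  | [] => exact pv_loopA_nil _
  | (n0, v0) :: rest =>
      by_cases h0 : n0 = 0
      · subst h0
        simp [pv_loopA_zero]
      · simp only [h0, beq_iff_eq, Bool.false_eq_true, if_false]
        exact pv_loops_eq n0 v0 rest h0 _ (by intro c hc; rw [PySem.List.mem_pyRange_one] at hc; omega)
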